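-- pv_equiv track=rewrite | github.com/MarkSon-42/Team_ALGO | hyungjoon/프로그래머스/레벨 2/230706_프로그래머스_131701_연속 부분 수열 합의 개수/solved3.py | solution
-- ===== SOURCE A (Python) =====
-- def solution(elements):
--     answer = set()
--
--     # 길이가 n일 때, 탐색해야 하는 인덱스는 [현재 인덱스 : 현재 인덱스 + 인덱스 % n] 이다.
--     # 예를들어, 길이가 3인 연속 부분 수열에서 현재 인덱스가 4면, 4, 7, 9 임
--     # 그러면, i에서 수를 하나 정해주고.. 그 수에서 1, 2, 3, 4, 5 길이 수열 구해주고, 그 다음꺼 구해주고 이런식으로하면 되지않나?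
--     # temp += elements[j%n]
--     n = len(elements)
--
--     for i in range(n):
--         temp = 0
--         for j in range(i, i+n):
--             index = j
--             temp += elements[j%n]
--             answer.add(temp)
--
--     return answer
-- ===== SOURCE B (Python) =====
-- def solution(elements):
--     # Prefix-sum table over the doubled array; each circular sum is a difference
--     # of two table entries instead of an incrementally re-accumulated total.
--     n = len(elements)
--     d = elements + elements
--     p = [0]
--     acc = 0
--     for x in d:
--         acc += x
--         p.append(acc)
--     answer = set()
--     for i in range(n):
--         for length in range(1, n + 1):
--             answer.add(p[i + length] - p[i])
--     return answer
-- ===== Notes on version B (the rewrite author's own statement) =====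
-- stated objective: alternative
-- what changed: B precomputes a prefix-sum table of the doubled array once and obtains every circular subarray sum as a difference of two table entries, instead of A's per-start incremental accumulator with modular indexing.
import Mathlib
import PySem

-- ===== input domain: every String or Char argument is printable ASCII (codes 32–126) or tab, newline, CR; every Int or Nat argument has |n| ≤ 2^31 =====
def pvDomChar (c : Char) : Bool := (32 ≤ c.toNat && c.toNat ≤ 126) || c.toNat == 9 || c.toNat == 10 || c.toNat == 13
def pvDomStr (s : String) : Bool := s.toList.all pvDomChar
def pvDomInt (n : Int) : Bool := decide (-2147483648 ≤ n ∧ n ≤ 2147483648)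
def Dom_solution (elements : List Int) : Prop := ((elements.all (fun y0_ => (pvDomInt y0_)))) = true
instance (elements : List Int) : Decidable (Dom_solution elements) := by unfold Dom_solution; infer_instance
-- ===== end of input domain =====

-- B replaces A's per-start incremental accumulator (with modular indexing) by a
-- prefix-sum table over the doubled array, reading each sum as a difference of
-- two table entries; objective: alternative (same O(n^2) cost).

-- ===== PORT A =====
-- elements[j % n]: inside the loops n ≥ 1 and 0 ≤ j % n < n, so the index is
-- always in range and pyGetD is exact.
def solution (elements : List Int) : List Int :=
  let n : Int := elements.length
  (PySem.List.pyRange 0 n 1).foldl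
    (fun answer i =>
      ((PySem.List.pyRange i (i + n) 1).foldl
        (fun (st : Int × PySem.Set Int) j =>
          let temp := st.1 + PySem.List.pyGetD elements (PySem.Int.mod j n) 0
          (temp, PySem.Set.add st.2 temp))
        (0, answer)).2)
    PySem.Set.empty

-- ===== PORT B =====
-- p[i + length] and p[i]: 0 ≤ i < n and 1 ≤ length ≤ n while p has length
-- 2n + 1, so both indices are always in range and pyGetD is exact.
def solution_alt (elements : List Int) : List Int :=
  let n : Int := elements.length
  let d := elements ++ elements
  let p := (d.foldl (fun (st : Int × List Int) x => (st.1 + x, st.2 ++ [st.1 + x])) (0, [0])).2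
  (PySem.List.pyRange 0 n 1).foldl
    (fun answer i =>
      (PySem.List.pyRange 1 (n + 1) 1).foldl
        (fun ans len =>
          PySem.Set.add ans (PySem.List.pyGetD p (i + len) 0 - PySem.List.pyGetD p i 0))
        answer)
    PySem.Set.empty

-- ===== PRECONDITION & SPEC =====
def Spec_solution (elements : List Int) (out : List Int) : Prop := out = solution_alt elements
instance (elements : List Int) (out : List Int) : Decidable (Spec_solution elements out) := by unfold Spec_solution; infer_instance

-- ===== CLAIM (what is proved, stated in full; the proofs are below) =====
def Claim_equal_solution : Prop := ∀ (elements : List Int), Dom_solution elements → Spec_solution elements (solution elements)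

-- ===== LEMMAS AND PROOFS =====

-- The prefix-table loop of B computes exactly the list of partial sums.
theorem pvFoldPref (d : List Int) : ∀ (acc : Int) (l : List Int),
    d.foldl (fun (st : Int × List Int) x => (st.1 + x, st.2 ++ [st.1 + x])) (acc, l)
      = (acc + d.sum, l ++ (List.range d.length).map (fun k => acc + (d.take (k + 1)).sum)) := by
  induction d with
  | nil => intro acc l; simp
  | cons x d ih =>
      intro acc l
      simp only [List.foldl_cons, ih (acc + x) (l ++ [acc + x]), List.length_cons,
        List.range_succ_eq_map, List.map_cons, List.map_map, List.sum_cons, Prod.mk.injEq]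
      refine ⟨by ring, ?_⟩
      have hmap : List.map ((fun k => acc + (List.take (k + 1) (x :: d)).sum) ∘ Nat.succ) (List.range d.length)
          = List.map (fun k => acc + x + (List.take (k + 1) d).sum) (List.range d.length) := by
        apply List.map_congr_left; intro k _
        simp only [Function.comp, List.take_succ_cons, List.sum_cons]; ring
      rw [hmap]
      simp [List.take_succ_cons]

-- Entry m of B's prefix table is the sum of the first m elements of d.
theorem pvPGet (d : List Int) (m : Nat) (hm : m ≤ d.length) :
    PySem.List.pyGetD ((d.foldl (fun (st : Int × List Int) x => (st.1 + x, st.2 ++ [st.1 + x])) (0, ([0] : List Int))).2) (m : Int) 0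
      = (d.take m).sum := by
  rw [pvFoldPref]
  rw [PySem.List.pyGetD_natCast]
  cases m with
  | zero => simp
  | succ k =>
      have hk : k < d.length := by omega
      simp [List.getD, hk]

theorem pvTakeSucc (d : List Int) (m : Nat) (hm : m < d.length) :
    (d.take (m + 1)).sum = (d.take m).sum + d[m] :=
  List.sum_take_succ d m hm

-- the doubled list read at m equals elements[(m) mod n] for m < 2n
theorem pvDoubleGet (elements : List Int) (m : Nat) (hm : m < 2 * elements.length) :
    PySem.List.pyGetD elements (PySem.Int.mod (m : Int) (elements.length : Int)) 0
      = (elements ++ elements)[m]'(by simp; omega) := by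
  have hn : 0 < elements.length := by omega
  rw [PySem.Int.mod_eq_emod_of_pos (by exact_mod_cast hn)]
  by_cases h : m < elements.length
  · have hmm : ((m : Int) % (elements.length : Int)) = (m : Int) :=
      Int.emod_eq_of_lt (by positivity) (by exact_mod_cast h)
    rw [hmm, PySem.List.pyGetD_natCast, List.getD, List.getElem?_eq_getElem h]
    simp [List.getElem_append_left h]
  · have h2 : ((m : Int) % (elements.length : Int)) = ((m - elements.length : Nat) : Int) := by
      have : (m : Int) % (elements.length : Int) = ((m : Int) - elements.length) % elements.length := by
        rw [Int.sub_emod_right]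
      rw [this, Int.emod_eq_of_lt (by omega) (by omega)]
      omega
    rw [h2, PySem.List.pyGetD_natCast, List.getD]
    have h3 : m - elements.length < elements.length := by omega
    rw [List.getElem?_eq_getElem h3]
    simp [List.getElem_append_right (by omega : elements.length ≤ m)]

-- Inner loops agree: A's running accumulator equals a difference of prefix sums.
theorem pvInner (elements : List Int) (i : Nat) (hi : i < elements.length) :
    ∀ (k : Nat), k ≤ elements.length → ∀ (ans : PySem.Set Int),
      (PySem.List.pyRange (i : Int) ((i : Int) + k) 1).foldl
        (fun (st : Int × PySem.Set Int) j =>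
          let temp := st.1 + PySem.List.pyGetD elements (PySem.Int.mod j (elements.length : Int)) 0
          (temp, PySem.Set.add st.2 temp))
        (0, ans)
      = (((elements ++ elements).take (i + k)).sum - ((elements ++ elements).take i).sum,
         (PySem.List.pyRange 1 ((k : Int) + 1) 1).foldl
           (fun ans len =>
             PySem.Set.add ans
               (PySem.List.pyGetD ((elements ++ elements).foldl (fun (st : Int × List Int) x => (st.1 + x, st.2 ++ [st.1 + x])) (0, ([0] : List Int))).2 ((i : Int) + len) 0
                - PySem.List.pyGetD ((elements ++ elements).foldl (fun (st : Int × List Int) x => (st.1 + x, st.2 ++ [st.1 + x])) (0, ([0] : List Int))).2 (i : Int) 0))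
           ans) := by
  intro k
  induction k with
  | zero =>
      intro _ ans
      simp [PySem.List.pyRange_one_eq_nil]
  | succ k ih =>
      intro hk ans
      have hk' : k ≤ elements.length := by omega
      have r1 : PySem.List.pyRange (i : Int) ((i : Int) + ((k + 1 : Nat) : Int)) 1
          = PySem.List.pyRange (i : Int) ((i : Int) + (k : Int)) 1 ++ [(i : Int) + (k : Int)] := by
        have h := PySem.List.pyRange_one_succ_right (a := (i : Int)) (b := (i : Int) + (k : Int)) (by omega)
        push_cast
        rw [← add_assoc]
        exact h
      have r2 : PySem.List.pyRange 1 (((k + 1 : Nat) : Int) + 1) 1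
          = PySem.List.pyRange 1 ((k : Int) + 1) 1 ++ [(k : Int) + 1] := by
        have h := PySem.List.pyRange_one_succ_right (a := (1 : Int)) (b := (k : Int) + 1) (by omega)
        push_cast
        exact h
      rw [r1, r2, List.foldl_append, List.foldl_append, ih hk' ans]
      simp only [List.foldl_cons, List.foldl_nil]
      have hE := pvDoubleGet elements (i + k) (by omega)
      have hT := pvTakeSucc (elements ++ elements) (i + k) (by simp; omega)
      have hP1 := pvPGet (elements ++ elements) (i + (k + 1)) (by simp; omega)
      have hP0 := pvPGet (elements ++ elements) i (by simp; omega)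
      push_cast at hE hP1 hP0 ⊢
      rw [hE, hP1, hP0]
      have htk : (i : Nat) + (k + 1) = (i + k) + 1 := by omega
      rw [htk] at *
      rw [hT]
      simp only [Prod.mk.injEq]
      refine ⟨by ring, ?_⟩
      congr 1
      ring

-- ===== VERDICT (by name: the statement is the Claim_ definition above) =====
theorem solution_spec : Claim_equal_solution := by
  unfold Claim_equal_solution
  intro elements _
  simp only [Spec_solution, solution, solution_alt]
  apply PySem.List.foldl_congr_mem
  intro ans x hx
  rw [PySem.List.mem_pyRange_one] at hx
  obtain ⟨h0, h1⟩ := hx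
  have hx' : ((x.toNat : Nat) : Int) = x := Int.toNat_of_nonneg h0
  have hlt : x.toNat < elements.length := by omega
  have h := congrArg Prod.snd (pvInner elements x.toNat hlt elements.length (le_refl _) ans)
  simp only [hx'] at h
  exact h
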